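-- pv_equiv track=rewrite | github.com/kareemadesola/pythonDataStructures | LeetCode/daily/january_24.py | minOperationsAlt
-- ===== SOURCE A (Python) =====
-- from collections import defaultdict, Counter
-- from typing import List, Optional
--
-- def minOperationsAlt(nums: List[int]) -> int:
--     nums.sort()
--
--     cache = {}
--
--     def dfs(n):
--         if n < 0:
--             return float('inf')
--         if n in (2, 3):
--             return 1
--         if n in cache:
--             return cache[n]
--
--         res = min(dfs(n - 2), dfs(n - 3))
--         if res == -1:
--             return -1
--         cache[n] = res + 1
--         return res + 1
--
--     count = Counter(nums)
--     res = 0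
--     for n, c in count.items():
--         op = dfs(c)
--         if op == float("inf"):
--             return -1
--         res += op
--     return res
-- ===== SOURCE B (Python) =====
-- from collections import Counter
--
--
-- def minOperationsAlt(nums):
--     # Same in-place sort side effect as A; the answer itself is a closed form per count.
--     nums.sort()
--     counts = Counter(nums)
--     if 1 in counts.values():
--         return -1
--     return sum((c + 2) // 3 for c in counts.values())
-- ===== Notes on version B (the rewrite author's own statement) =====
-- stated objective: faster
-- what changed: Replaces the memoized dfs recursion (min of take-2/take-3 per count) with the closed form ceil(c/3) = (c+2)//3 per count, returning -1 as soon as some count is 1.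
import Mathlib
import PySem

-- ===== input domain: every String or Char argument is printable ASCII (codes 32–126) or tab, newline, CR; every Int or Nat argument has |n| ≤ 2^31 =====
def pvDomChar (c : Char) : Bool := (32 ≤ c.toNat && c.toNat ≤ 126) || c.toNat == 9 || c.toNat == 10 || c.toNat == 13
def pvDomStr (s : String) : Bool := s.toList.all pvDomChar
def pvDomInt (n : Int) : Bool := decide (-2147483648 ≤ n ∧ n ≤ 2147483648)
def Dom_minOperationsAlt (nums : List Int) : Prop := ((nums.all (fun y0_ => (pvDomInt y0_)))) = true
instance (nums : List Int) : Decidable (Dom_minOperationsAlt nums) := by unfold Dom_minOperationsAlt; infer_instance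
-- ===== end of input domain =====

-- B replaces A's memoized dfs recursion with a closed form (c+2)//3 per count; both ports are about
-- the RETURN value only (both Pythons sort `nums` in place, so the side effect is the same).

-- ===== PORT A =====
-- Python's min over {float('inf'), ints}: `none` stands for float('inf').
def pvMinInf : Option Int → Option Int → Option Int
  | none, b => b
  | some x, none => some x
  | some x, some y => some (min x y)

-- A's inner `dfs`, with a fuel argument making the (in Python unbounded) recursion structural;
-- the fuel used below is always sufficient, and A's `cache` is pure memoization (no semantic effect).
def pvDfsA : Nat → Int → Option Int
  | 0, _ => none
  | fuel + 1, n =>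
    if n < 0 then none
    else if n = 2 ∨ n = 3 then some 1
    else
      match pvMinInf (pvDfsA fuel (n - 2)) (pvDfsA fuel (n - 3)) with
      | none => none          -- res == inf propagates (A returns inf here via cache-free path)
      | some r => if r = -1 then some (-1) else some (r + 1)

-- the `for n, c in count.items()` loop with its early `return -1`
def pvLoopA : List (Int × Int) → Int → Int
  | [], res => res
  | (_, c) :: rest, res =>
    match pvDfsA (c.toNat + 1) c with
    | none => -1
    | some op => pvLoopA rest (res + op)

def minOperationsAlt (nums : List Int) : Int :=
  pvLoopA (PySem.Dict.counter (PySem.List.sorted nums (fun x => x) false)).items 0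

-- ===== PORT B =====
def minOperationsAlt_alt (nums : List Int) : Int :=
  let vals := (PySem.Dict.counter (PySem.List.sorted nums (fun x => x) false)).values
  if vals.contains 1 then -1
  else (vals.map (fun c => PySem.Int.floordiv (c + 2) 3)).sum

-- ===== PRECONDITION & SPEC =====
def Spec_minOperationsAlt (nums : List Int) (out : Int) : Prop := out = minOperationsAlt_alt nums
instance (nums : List Int) (out : Int) : Decidable (Spec_minOperationsAlt nums out) := by unfold Spec_minOperationsAlt; infer_instance

-- ===== CLAIM (what is proved, stated in full; the proofs are below) =====
def Claim_equal_minOperationsAlt : Prop := ∀ (nums : List Int), Dom_minOperationsAlt nums → Spec_minOperationsAlt nums (minOperationsAlt nums)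

-- ===== LEMMAS AND PROOFS =====

lemma pvDfsA_neg (fuel : Nat) (n : Int) (h : n < 0) : pvDfsA fuel n = none := by
  cases fuel with
  | zero => rfl
  | succ f => simp [pvDfsA, h]

lemma pvDfsA_one (fuel : Nat) : pvDfsA fuel 1 = none := by
  cases fuel with
  | zero => rfl
  | succ f =>
    simp only [pvDfsA]
    rw [pvDfsA_neg f (1 - 2) (by omega), pvDfsA_neg f (1 - 3) (by omega)]
    norm_num [pvMinInf]

lemma pvDfsA_ge_two (fuel : Nat) (n : Int) (h2 : 2 ≤ n) (hf : n < (fuel : Int)) :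
    pvDfsA fuel n = some (PySem.Int.floordiv (n + 2) 3) := by
  induction fuel generalizing n with
  | zero => omega
  | succ f ih =>
    rw [PySem.Int.floordiv_eq_ediv_of_pos (by omega)]
    by_cases h23 : n = 2 ∨ n = 3
    · simp only [pvDfsA, if_neg (by omega : ¬ n < 0), if_pos h23]
      rcases h23 with h | h <;> subst h <;> norm_num
    · simp only [pvDfsA, if_neg (by omega : ¬ n < 0), if_neg h23]
      by_cases h4 : n = 4
      · subst h4
        rw [show (4:Int) - 2 = 2 by norm_num, show (4:Int) - 3 = 1 by norm_num,
            ih 2 (by omega) (by omega), pvDfsA_one f,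
            PySem.Int.floordiv_eq_ediv_of_pos (by omega)]
        norm_num [pvMinInf]
      · have hn5 : 5 ≤ n := by omega
        rw [ih (n - 2) (by omega) (by omega), ih (n - 3) (by omega) (by omega),
            PySem.Int.floordiv_eq_ediv_of_pos (by omega),
            PySem.Int.floordiv_eq_ediv_of_pos (by omega)]
        simp only [pvMinInf]
        have hmin : min ((n - 2 + 2) / 3) ((n - 3 + 2) / 3) = (n + 2) / 3 - 1 := by omega
        rw [hmin, if_neg (by omega), Option.some.injEq]
        omega

lemma pvLoopA_eq (items : List (Int × Int)) (res : Int)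
    (hpos : ∀ p ∈ items, 1 ≤ p.2) :
    pvLoopA items res =
      if (items.map (·.2)).contains 1 then -1
      else res + ((items.map (·.2)).map (fun c => PySem.Int.floordiv (c + 2) 3)).sum := by
  induction items generalizing res with
  | nil => simp [pvLoopA]
  | cons p rest ih =>
    obtain ⟨k, c⟩ := p
    have hc : 1 ≤ c := hpos (k, c) (by simp)
    by_cases h1 : c = 1
    · subst h1
      simp [pvLoopA, pvDfsA_one]
    · have hc2 : 2 ≤ c := by omega
      have hlt : c < ((c.toNat + 1 : Nat) : Int) := by omega
      simp only [pvLoopA, pvDfsA_ge_two (c.toNat + 1) c hc2 hlt]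
      rw [ih _ (fun p hp => hpos p (by simp [hp]))]
      simp only [List.map_cons, List.contains_cons, List.sum_cons]
      have hne : ((1 : Int) == c) = false := by
        simpa using fun h => h1 h.symm
      rw [hne]
      simp only [Bool.false_or]
      split_ifs with h
      · rfl
      · ring

lemma counter_values_pos (xs : List Int) (c : Int)
    (hc : c ∈ (PySem.Dict.counter xs).values) : 1 ≤ c := by
  have hv : (PySem.Dict.counter xs).values =
      (PySem.Set.ofList xs).map (fun k => ((xs.count k : Nat) : Int)) := by
    show ((PySem.Dict.counter xs).items).map (·.2) = _
    rw [PySem.Dict.items_counter]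
    simp
  rw [hv] at hc
  obtain ⟨k, hk, rfl⟩ := List.mem_map.mp hc
  have := List.count_pos_iff.mpr ((PySem.Set.mem_ofList _ _).mp hk)
  omega

-- ===== VERDICT (by name: the statement is the Claim_ definition above) =====
theorem minOperationsAlt_spec : Claim_equal_minOperationsAlt := by
  intro nums _
  unfold Spec_minOperationsAlt minOperationsAlt minOperationsAlt_alt
  have hvals : ((PySem.Dict.counter (PySem.List.sorted nums (fun x => x) false)).items).map (·.2)
      = (PySem.Dict.counter (PySem.List.sorted nums (fun x => x) false)).values := rfl
  rw [pvLoopA_eq _ 0 (fun p hp => by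
    apply counter_values_pos (PySem.List.sorted nums (fun x => x) false) p.2
    rw [← hvals]; exact List.mem_map.mpr ⟨p, hp, rfl⟩)]
  rw [hvals]
  simp
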